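-- pv_equiv track=rewrite | github.com/Cheunry/turtle-website | doc/sql/seed_bulk_books_chapters.py | gen_content
-- ===== SOURCE A (Python) =====
-- CONTENT_SEED = (
--     "天地玄黄，宇宙洪荒。日月盈昃，辰宿列张。寒来暑往，秋收冬藏。"
--     "闰余成岁，律吕调阳。云腾致雨，露结为霜。金生丽水，玉出昆冈。"
-- )
--
-- def gen_content(length: int) -> str:
--     buf: list[str] = []
--     total = 0
--     while total < length:
--         buf.append(CONTENT_SEED)
--         total += len(CONTENT_SEED)
--     s = "".join(buf)[:length]
--     return s
-- ===== SOURCE B (Python) =====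
-- CONTENT_SEED = (
--     "天地玄黄，宇宙洪荒。日月盈昃，辰宿列张。寒来暑往，秋收冬藏。"
--     "闰余成岁，律吕调阳。云腾致雨，露结为霜。金生丽水，玉出昆冈。"
-- )
--
-- def gen_content(length: int) -> str:
--     return (CONTENT_SEED * (length // len(CONTENT_SEED) + 1))[:length]
-- ===== Notes on version B (the rewrite author's own statement) =====
-- stated objective: simpler
-- what changed: Replaced the while-loop with a list buffer and join by a closed-form expression: multiply CONTENT_SEED by its floor-divided copy count plus an extra copy, then slice up to the requested number of characters.
import Mathlib
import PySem

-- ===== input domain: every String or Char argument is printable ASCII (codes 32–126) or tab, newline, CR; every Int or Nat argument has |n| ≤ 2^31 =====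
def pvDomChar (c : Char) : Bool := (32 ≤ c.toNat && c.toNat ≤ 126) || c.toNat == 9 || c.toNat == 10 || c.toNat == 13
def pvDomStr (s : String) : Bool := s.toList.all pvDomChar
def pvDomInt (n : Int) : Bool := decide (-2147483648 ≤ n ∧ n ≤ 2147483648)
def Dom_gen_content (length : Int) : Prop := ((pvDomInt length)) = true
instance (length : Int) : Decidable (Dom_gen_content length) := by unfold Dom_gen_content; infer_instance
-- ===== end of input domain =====

set_option maxRecDepth 4000

-- B replaces A's while-loop and list buffer by the closed form (seed * (length // len(seed) + 1))[:length]; objective: simpler.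

def CONTENT_SEED : String :=
  "天地玄黄，宇宙洪荒。日月盈昃，辰宿列张。寒来暑往，秋收冬藏。闰余成岁，律吕调阳。云腾致雨，露结为霜。金生丽水，玉出昆冈。"

theorem seedLen_eq : PySem.Str.len CONTENT_SEED = 60 := by decide

-- ===== PORT A =====
-- the 'while total < length' loop, carrying (total, buf) exactly as A does
def gen_content_loop (length total : Int) (buf : List String) : List String :=
  if total < length then
    gen_content_loop length (total + PySem.Str.len CONTENT_SEED) (buf ++ [CONTENT_SEED])
  else buf
termination_by (length - total).toNat
decreasing_by
  have h := seedLen_eq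
  omega

def gen_content (length : Int) : String :=
  PySem.Str.slice (PySem.Str.join "" (gen_content_loop length 0 [])) none (some length)

-- ===== PORT B =====
-- 'CONTENT_SEED * n' has no Str primitive; it is ported exactly via List.pyRepeat on the code points
def gen_content_alt (length : Int) : String :=
  String.ofList
    (PySem.List.slice
      (PySem.List.pyRepeat CONTENT_SEED.toList
        (PySem.Int.floordiv length (PySem.Str.len CONTENT_SEED) + 1))
      none (some length))

-- ===== PRECONDITION & SPEC =====
def Spec_gen_content (length : Int) (out : String) : Prop := out = gen_content_alt length
instance (length : Int) (out : String) : Decidable (Spec_gen_content length out) := by unfold Spec_gen_content; infer_instance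

-- ===== CLAIM (what is proved, stated in full; the proofs are below) =====
def Claim_equal_gen_content : Prop := ∀ (length : Int), Dom_gen_content length → Spec_gen_content length (gen_content length)

-- ===== LEMMAS AND PROOFS =====

theorem seed_toList_len : CONTENT_SEED.toList.length = 60 := by
  have h := seedLen_eq
  simp [PySem.Str.len] at h
  exact_mod_cast h

-- the loop produces exactly ⌈(length - total)/60⌉ copies of the seed, appended to buf
theorem gen_content_loop_eq (length total : Int) (buf : List String) :
    gen_content_loop length total buf
      = buf ++ List.replicate (((length - total).toNat + 59) / 60) CONTENT_SEED := by
  unfold gen_content_loop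
  split
  · rw [gen_content_loop_eq length (total + PySem.Str.len CONTENT_SEED) (buf ++ [CONTENT_SEED])]
    rw [seedLen_eq]
    have hK : ((length - total).toNat + 59) / 60
        = ((length - (total + 60)).toNat + 59) / 60 + 1 := by omega
    rw [hK, List.replicate_succ, List.append_assoc]
    rfl
  · have h0 : (length - total).toNat = 0 := by omega
    simp [h0]
termination_by (length - total).toNat
decreasing_by
  have h := seedLen_eq
  omega

theorem join_empty_sep (l : List (List Char)) : PySem.Chars.join [] l = l.flatten := by
  induction l with
  | nil => rfl
  | cons h t ih =>
    cases t with
    | nil => simp [PySem.Chars.join, List.intercalate]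
    | cons h2 t2 =>
      simp only [PySem.Chars.join, List.intercalate, List.intersperse] at ih ⊢
      simp_all

theorem flatten_rep_len (s : List Char) (k : Nat) :
    ((List.replicate k s).flatten).length = k * s.length := by
  simp [List.length_flatten, List.map_replicate, List.sum_replicate]

-- taking n code points from k copies of the seed does not depend on k, as long as k copies suffice
theorem take_flatten_rep_le (s : List Char) (n k m : Nat) (hkm : k ≤ m) (hk : n ≤ k * s.length) :
    ((List.replicate k s).flatten).take n = ((List.replicate m s).flatten).take n := by
  have hsplit : List.replicate m s = List.replicate k s ++ List.replicate (m - k) s := by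
    rw [← List.replicate_add]
    congr 1
    omega
  rw [hsplit, List.flatten_append, List.take_append_of_le_length]
  rw [flatten_rep_len]
  exact hk

theorem take_flatten_rep (s : List Char) (n k m : Nat) (hk : n ≤ k * s.length)
    (hm : n ≤ m * s.length) :
    ((List.replicate k s).flatten).take n = ((List.replicate m s).flatten).take n := by
  rcases le_total k m with h | h
  · exact take_flatten_rep_le s n k m h hk
  · exact (take_flatten_rep_le s n m k h hm).symm

theorem gen_content_spec_aux (length : Int) : gen_content length = gen_content_alt length := by
  have hseed := seed_toList_len
  unfold gen_content gen_content_alt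
  rw [gen_content_loop_eq, List.nil_append]
  simp only [PySem.Str.slice]
  rw [PySem.Str.toList_join, List.map_replicate]
  have h0 : ("" : String).toList = ([] : List Char) := rfl
  rw [h0, join_empty_sep]
  simp only [PySem.Chars.slice_eq_listSlice]
  congr 1
  rw [PySem.List.pyRepeat]
  have hfd : PySem.Int.floordiv length (PySem.Str.len CONTENT_SEED) = length / 60 := by
    rw [seedLen_eq, PySem.Int.floordiv, Int.fdiv_eq_ediv]
    simp
  rw [hfd]
  rcases lt_trichotomy length 0 with hneg | hz | hpos
  · -- negative length: zero copies on both sides, and a slice of [] is []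
    have hA0 : ((length - 0).toNat + 59) / 60 = 0 := by omega
    have hB0 : (length / 60 + 1).toNat = 0 := by
      have : length / 60 ≤ -1 := by omega
      omega
    rw [hA0, hB0]
  · -- zero length: take 0 on both sides
    subst hz
    rw [PySem.List.slice_to _ (le_refl (0 : Int)), PySem.List.slice_to _ (le_refl (0 : Int))]
    simp
  · -- positive length: both strings are at least `length` code points long
    rw [PySem.List.slice_to _ (le_of_lt hpos), PySem.List.slice_to _ (le_of_lt hpos)]
    apply take_flatten_rep
    · rw [hseed]
      omega
    · rw [hseed]
      have h1 : length ≤ 60 * (length / 60 + 1) := by omega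
      omega

-- ===== VERDICT (by name: the statement is the Claim_ definition above) =====
theorem gen_content_spec : Claim_equal_gen_content := by
  intro length _
  unfold Spec_gen_content
  exact gen_content_spec_aux length
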